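-- pv_equiv track=rewrite | github.com/MarcusTL12/pyscf-mrchem-guess | from_orca.py | make_basis_permutation
-- ===== SOURCE A (Python) =====
-- angmom_to_l = {
--     'S': 0,
--     'P': 1,
--     'D': 2,
--     'F': 3,
--     'G': 4,
--     'H': 5,
-- }
--
-- def shell_permutation(angmom):
--     if angmom == 'P':
--         return [1, 2, 0]  # Hardcode xyz order for p orbitals
--
--     l = angmom_to_l[angmom]
--
--     m_to_i = {m: i for i, m in enumerate(range(-l, l+1))}
--
--     perm = [m_to_i[0]]
--
--     for m in range(l):
--         perm.append(m_to_i[m + 1])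
--         perm.append(m_to_i[-(m + 1)])
--
--     return invert_perm(perm)
--
-- def atom_basis_permutation(atom_basis):
--     perm = []
--
--     for angmom in atom_basis:
--         shell_perm = shell_permutation(angmom)
--
--         num_funcs = 0
--         for _, coeffs in atom_basis[angmom]:
--             num_funcs += len(coeffs)
--
--         for _ in range(num_funcs):
--             offset = len(perm)
--             for i in shell_perm:
--                 perm.append(i + offset)
--
--     return perm
--
-- def make_basis_permutation(atoms, basis):
--     atom_type_order = {}
--
--     for s, _, _ in atoms:
--         if s not in atom_type_order:
--             atom_type_order[s] = len(atom_type_order)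
--
--     atoms_ordered = [(atom_type_order[s], i)
--                      for i, (s, _, _) in enumerate(atoms)]
--     atoms_ordered.sort()
--
--     atoms_perm = [i for _, i in atoms_ordered]
--
--     atom_basis_perms = {s: atom_basis_permutation(basis[s]) for s in basis}
--
--     atoms_offsets = []
--     offset = 0
--     for s, _, _ in atoms:
--         atoms_offsets.append(offset)
--         offset += len(atom_basis_perms[s])
--
--     perm = []
--
--     for i in atoms_perm:
--         s = atoms[i][0]
--         for j in atom_basis_perms[s]:
--             perm.append(j + atoms_offsets[i])
--
--     return perm
--
-- def invert_perm(perm):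
--     invperm = [-1 for _ in perm]
--
--     for i, j in enumerate(perm):
--         invperm[j] = i
--
--     return invperm
-- ===== SOURCE B (Python) =====
-- angmom_to_l = {
--     'S': 0,
--     'P': 1,
--     'D': 2,
--     'F': 3,
--     'G': 4,
--     'H': 5,
-- }
--
-- def shell_permutation(angmom):
--     if angmom == 'P':
--         return [1, 2, 0]  # Hardcode xyz order for p orbitals
--
--     l = angmom_to_l[angmom]
--
--     # closed form of the inverted interleaving m-order: 0, +1, -1, +2, -2, ...
--     return [2 * (l - j) if j < l else (2 * (j - l) - 1 if j > l else 0)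
--             for j in range(2 * l + 1)]
--
-- def atom_basis_permutation(atom_basis):
--     perm = []
--     offset = 0
--     for angmom, shells in atom_basis.items():
--         sp = shell_permutation(angmom)
--         n = sum(len(coeffs) for _, coeffs in shells)
--         for _ in range(n):
--             perm.extend(i + offset for i in sp)
--             offset += len(sp)
--     return perm
--
-- def make_basis_permutation(atoms, basis):
--     atom_basis_perms = {s: atom_basis_permutation(ab) for s, ab in basis.items()}
--
--     # bucket the atoms' basis offsets by atom type, in first-appearance type order
--     groups = {}
--     offset = 0
--     for s, _, _ in atoms:
--         groups.setdefault(s, []).append(offset)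
--         offset += len(atom_basis_perms[s])
--
--     perm = []
--     for s, offs in groups.items():
--         ap = atom_basis_perms[s]
--         for o in offs:
--             for j in ap:
--                 perm.append(j + o)
--     return perm
-- ===== Notes on version B (the rewrite author's own statement) =====
-- stated objective: simpler
-- what changed: B replaces A's atom_type_order dict + enumerated tuple-list + lexicographic sort with a single-pass dict-of-lists bucket grouping of atom offsets by type in first-appearance order (no sort, no atoms_perm/atoms_offsets index lists, no index lookups in the emission loop), and replaces shell_permutation's build-then-invert interleaving loop with a closed-form comprehension.
import Mathlib
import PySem

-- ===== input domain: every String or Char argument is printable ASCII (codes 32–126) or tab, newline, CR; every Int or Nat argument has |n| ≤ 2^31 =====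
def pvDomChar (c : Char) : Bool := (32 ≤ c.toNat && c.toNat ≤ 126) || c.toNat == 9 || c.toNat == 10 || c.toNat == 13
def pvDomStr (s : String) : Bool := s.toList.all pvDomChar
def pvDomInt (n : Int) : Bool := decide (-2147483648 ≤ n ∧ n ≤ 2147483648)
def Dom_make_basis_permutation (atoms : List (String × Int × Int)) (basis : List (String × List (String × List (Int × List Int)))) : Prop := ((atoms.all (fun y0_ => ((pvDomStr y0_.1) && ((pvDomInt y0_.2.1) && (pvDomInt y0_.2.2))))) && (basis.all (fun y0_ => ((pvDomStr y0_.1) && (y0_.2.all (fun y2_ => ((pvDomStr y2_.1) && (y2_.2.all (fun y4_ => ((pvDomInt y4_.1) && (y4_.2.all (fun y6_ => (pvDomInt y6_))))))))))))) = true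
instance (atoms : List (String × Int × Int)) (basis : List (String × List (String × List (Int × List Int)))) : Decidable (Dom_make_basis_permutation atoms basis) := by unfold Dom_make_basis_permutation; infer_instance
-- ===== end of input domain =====

-- B replaces A's order-dict + tuple-list sort with a one-pass bucket grouping of the atoms
-- by type (first-appearance order) and A's build-then-invert shell loop with a closed form;
-- same return value on Pre_ (objective: simpler, no speed claim).

-- ===== PORT A =====

-- module constant, shared by both Python files
def angmom_to_l : PySem.Dict String Int :=
  PySem.Dict.ofList [("S", 0), ("P", 1), ("D", 2), ("F", 3), ("G", 4), ("H", 5)]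

def invert_perm (perm : List Int) : List Int :=
  let invperm := perm.map (fun _ => (-1 : Int))
  (PySem.List.enumerate perm).foldl (fun inv p => PySem.List.pySetD inv p.2 p.1) invperm

-- Pre_ guarantees angmom is a key of angmom_to_l (Python raises KeyError otherwise)
def shell_permutation (angmom : String) : List Int :=
  if angmom == "P" then [1, 2, 0]
  else
    let l := angmom_to_l.getD angmom 0
    let m_to_i : PySem.Dict Int Int :=
      (PySem.List.enumerate (PySem.List.pyRange (-l) (l + 1) 1)).foldl
        (fun d p => d.insert p.2 p.1) PySem.Dict.empty
    let perm : List Int := [m_to_i.getD 0 0]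
    let perm := (PySem.List.pyRange 0 l 1).foldl
      (fun perm m => perm ++ [m_to_i.getD (m + 1) 0] ++ [m_to_i.getD (-(m + 1)) 0]) perm
    invert_perm perm

-- 'for angmom in atom_basis' / 'atom_basis[angmom]': dict iteration over the association
-- list; Pre_ guarantees its keys are distinct, so the paired value is the dict lookup
def atom_basis_permutation (atom_basis : List (String × List (Int × List Int))) : List Int :=
  atom_basis.foldl (fun perm p =>
    let shell_perm := shell_permutation p.1
    let num_funcs := p.2.foldl (fun acc q => acc + PySem.List.len q.2) 0
    (PySem.List.pyRange 0 num_funcs 1).foldl (fun perm _ =>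
      let offset := PySem.List.len perm
      shell_perm.foldl (fun perm i => perm ++ [i + offset]) perm) perm) []

def make_basis_permutation (atoms : List (String × Int × Int)) (basis : List (String × List (String × List (Int × List Int)))) : List Int :=
  let atom_type_order : PySem.Dict String Int :=
    atoms.foldl (fun d a => if d.contains a.1 then d else d.insert a.1 (PySem.Dict.size d))
      PySem.Dict.empty
  let atoms_ordered : List (Int × Int) :=
    (PySem.List.enumerate atoms).map (fun p => (atom_type_order.getD p.2.1 0, p.1))
  let atoms_ordered := PySem.List.sorted2 atoms_ordered Prod.fst Prod.snd
  let atoms_perm : List Int := atoms_ordered.map Prod.snd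
  -- '{s: atom_basis_permutation(basis[s]) for s in basis}' (distinct keys under Pre_)
  let atom_basis_perms : PySem.Dict String (List Int) :=
    basis.foldl (fun d p => d.insert p.1 (atom_basis_permutation p.2)) PySem.Dict.empty
  -- Pre_ guarantees every atom type is a key of basis (Python raises KeyError otherwise)
  let atoms_offsets : List Int :=
    (atoms.foldl (fun (acc : List Int × Int) a =>
      (acc.1 ++ [acc.2], acc.2 + PySem.List.len (atom_basis_perms.getD a.1 []))) ([], 0)).1
  atoms_perm.foldl (fun perm i =>
    let s := (PySem.List.pyGetD atoms i ("", 0, 0)).1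
    (atom_basis_perms.getD s []).foldl
      (fun perm j => perm ++ [j + PySem.List.pyGetD atoms_offsets i 0]) perm) []

-- ===== PORT B =====

def shell_permutation_alt (angmom : String) : List Int :=
  if angmom == "P" then [1, 2, 0]
  else
    let l := angmom_to_l.getD angmom 0
    (PySem.List.pyRange 0 (2 * l + 1) 1).map (fun j =>
      if j < l then 2 * (l - j) else if l < j then 2 * (j - l) - 1 else 0)

def atom_basis_permutation_alt (atom_basis : List (String × List (Int × List Int))) : List Int :=
  (atom_basis.foldl (fun (st : List Int × Int) p =>
    let sp := shell_permutation_alt p.1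
    let n := (p.2.map (fun q => PySem.List.len q.2)).sum
    (PySem.List.pyRange 0 n 1).foldl (fun st _ =>
      (st.1 ++ sp.map (fun i => i + st.2), st.2 + PySem.List.len sp)) st) ([], 0)).1

def make_basis_permutation_alt (atoms : List (String × Int × Int)) (basis : List (String × List (String × List (Int × List Int)))) : List Int :=
  let atom_basis_perms : PySem.Dict String (List Int) :=
    basis.foldl (fun d p => d.insert p.1 (atom_basis_permutation_alt p.2)) PySem.Dict.empty
  -- bucket the atoms' basis offsets by type: groups.setdefault(s, []).append(offset)
  let groups : PySem.Dict String (List Int) :=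
    (atoms.foldl (fun (st : PySem.Dict String (List Int) × Int) a =>
      (st.1.modify a.1 [] (fun offs => offs ++ [st.2]),
       st.2 + PySem.List.len (atom_basis_perms.getD a.1 []))) (PySem.Dict.empty, 0)).1
  groups.items.foldl (fun perm p =>
    let ap := atom_basis_perms.getD p.1 []
    p.2.foldl (fun perm o => ap.foldl (fun perm j => perm ++ [j + o]) perm) perm) []

-- ===== PRECONDITION & SPEC =====
-- Pre_ excludes exactly the inputs where the Python A raises: an atom whose type is not a
-- key of basis, or a shell angmom outside angmom_to_l (both KeyError); the Nodup clauses
-- are the dict invariant of the association-list representation of basis and its values.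
def Pre_make_basis_permutation (atoms : List (String × Int × Int)) (basis : List (String × List (String × List (Int × List Int)))) : Prop :=
  (basis.map Prod.fst).Nodup ∧
  (∀ p ∈ basis, (p.2.map Prod.fst).Nodup) ∧
  (∀ a ∈ atoms, a.1 ∈ basis.map Prod.fst) ∧
  (∀ p ∈ basis, ∀ q ∈ p.2,
    q.1 = "S" ∨ q.1 = "P" ∨ q.1 = "D" ∨ q.1 = "F" ∨ q.1 = "G" ∨ q.1 = "H")
instance (atoms : List (String × Int × Int)) (basis : List (String × List (String × List (Int × List Int)))) : Decidable (Pre_make_basis_permutation atoms basis) := by unfold Pre_make_basis_permutation; infer_instance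

def pvWitness_make_basis_permutation : (List (String × Int × Int)) × (List (String × List (String × List (Int × List Int)))) :=
  ([("O", 0, 0), ("H", 1, 0), ("H", 2, 0)],
   [("O", [("S", [(1, [2, 3])]), ("P", [(1, [4])])]), ("H", [("S", [(1, [5])])])])

def Spec_make_basis_permutation (atoms : List (String × Int × Int)) (basis : List (String × List (String × List (Int × List Int)))) (out : List Int) : Prop := out = make_basis_permutation_alt atoms basis
instance (atoms : List (String × Int × Int)) (basis : List (String × List (String × List (Int × List Int)))) (out : List Int) : Decidable (Spec_make_basis_permutation atoms basis out) := by unfold Spec_make_basis_permutation; infer_instance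

-- ===== CLAIM (what is proved, stated in full; the proofs are below) =====
def Claim_equal_make_basis_permutation : Prop := ∀ (atoms : List (String × Int × Int)) (basis : List (String × List (String × List (Int × List Int)))), Dom_make_basis_permutation atoms basis → Pre_make_basis_permutation atoms basis → Spec_make_basis_permutation atoms basis (make_basis_permutation atoms basis)

-- ===== LEMMAS AND PROOFS =====


theorem shell_eq (s : String) : shell_permutation s = shell_permutation_alt s := by
  by_cases hP : s = "P"
  · subst hP; decide
  by_cases h1 : s = "S"; · subst h1; decide
  by_cases h2 : s = "D"; · subst h2; decide
  by_cases h3 : s = "F"; · subst h3; decide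
  by_cases h4 : s = "G"; · subst h4; decide
  by_cases h5 : s = "H"; · subst h5; decide
  have bS : (("S" : String) == s) = false := by simp [Ne.symm h1]
  have bP : (("P" : String) == s) = false := by simp [Ne.symm hP]
  have bD : (("D" : String) == s) = false := by simp [Ne.symm h2]
  have bF : (("F" : String) == s) = false := by simp [Ne.symm h3]
  have bG : (("G" : String) == s) = false := by simp [Ne.symm h4]
  have bH : (("H" : String) == s) = false := by simp [Ne.symm h5]
  have hl : angmom_to_l.getD s 0 = 0 := by
    simp [angmom_to_l, PySem.Dict.ofList, PySem.Dict.getD, PySem.Dict.get?,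
          PySem.Dict.update, PySem.Dict.insert, PySem.Dict.empty,
          PySem.Dict.contains, List.find?, bS, bP, bD, bF, bG, bH]
  simp only [shell_permutation, shell_permutation_alt, hl]
  rw [if_neg (by simp [hP]), if_neg (by simp [hP])]
  decide

theorem abp_inner (L : List Int) (sp perm : List Int) (o : Int)
    (ho : o = PySem.List.len perm) :
    L.foldl (fun (st : List Int × Int) _ =>
        (st.1 ++ sp.map (fun i => i + st.2), st.2 + PySem.List.len sp)) (perm, o)
    = (L.foldl (fun perm _ =>
        let offset := PySem.List.len perm
        sp.foldl (fun perm i => perm ++ [i + offset]) perm) perm,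
       PySem.List.len (L.foldl (fun perm _ =>
        let offset := PySem.List.len perm
        sp.foldl (fun perm i => perm ++ [i + offset]) perm) perm)) := by
  induction L generalizing perm o with
  | nil => simp [ho]
  | cons x t ih =>
    simp only [List.foldl_cons]
    rw [PySem.List.foldl_append_singleton_eq_map (f := fun i => i + PySem.List.len perm), ← ho]
    exact ih _ _ (by simp only [PySem.List.len_eq] at ho ⊢; simp; omega)

theorem abp_eq (ab : List (String × List (Int × List Int))) :
    atom_basis_permutation ab = atom_basis_permutation_alt ab := by
  unfold atom_basis_permutation atom_basis_permutation_alt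
  suffices h : ∀ (perm : List Int) (o : Int), o = PySem.List.len perm →
      ab.foldl (fun (st : List Int × Int) p =>
        let sp := shell_permutation_alt p.1
        let n := (p.2.map (fun q => PySem.List.len q.2)).sum
        (PySem.List.pyRange 0 n 1).foldl (fun st _ =>
          (st.1 ++ sp.map (fun i => i + st.2), st.2 + PySem.List.len sp)) st) (perm, o)
      = (ab.foldl (fun perm p =>
          let shell_perm := shell_permutation p.1
          let num_funcs := p.2.foldl (fun acc q => acc + PySem.List.len q.2) 0
          (PySem.List.pyRange 0 num_funcs 1).foldl (fun perm _ =>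
            let offset := PySem.List.len perm
            shell_perm.foldl (fun perm i => perm ++ [i + offset]) perm) perm) perm,
         PySem.List.len (ab.foldl (fun perm p =>
          let shell_perm := shell_permutation p.1
          let num_funcs := p.2.foldl (fun acc q => acc + PySem.List.len q.2) 0
          (PySem.List.pyRange 0 num_funcs 1).foldl (fun perm _ =>
            let offset := PySem.List.len perm
            shell_perm.foldl (fun perm i => perm ++ [i + offset]) perm) perm) perm)) by
    exact (congrArg Prod.fst (h [] 0 (by decide))).symm
  induction ab with
  | nil => intro perm o ho; simp [ho]
  | cons p t ih =>
    intro perm o ho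
    simp only [List.foldl_cons]
    rw [show (p.2.map (fun q => PySem.List.len q.2)).sum
        = p.2.foldl (fun acc q => acc + PySem.List.len q.2) 0 by
      rw [PySem.List.foldl_add]; simp]
    rw [shell_eq p.1]
    rw [abp_inner _ _ _ _ ho]
    exact ih _ _ rfl

theorem sorted2_eq_of_perm_of_pairwise (xs ys : List (Int × Int)) (hp : ys.Perm xs)
    (hpw : ys.Pairwise (fun a b => a.1 < b.1 ∨ (a.1 = b.1 ∧ a.2 < b.2))) :
    PySem.List.sorted2 xs Prod.fst Prod.snd = ys := by
  have hfun : (fun (a b : Int × Int) =>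
        (decide (a.1 < b.1) || (!decide (b.1 < a.1) && decide (a.2 < b.2))))
      = (fun (a b : Int × Int) => decide ((toLex a : Lex (Int × Int)) < toLex b)) := by
    funext a b
    rw [Bool.eq_iff_iff]
    simp [Prod.Lex.lt_iff]
    omega
  have hkey : PySem.List.sorted2 xs Prod.fst Prod.snd
      = PySem.List.sorted xs (fun p => (toLex p : Lex (Int × Int))) := by
    unfold PySem.List.sorted2 PySem.List.sorted
    simp only [Bool.false_eq_true, if_false]
    rw [hfun]
  rw [hkey]
  apply PySem.List.sorted_eq_of_perm_of_pairwise_lt xs ys _ hp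
  refine hpw.imp ?_
  intro a b hab
  rw [Prod.Lex.lt_iff]
  simpa using hab

theorem perm_partition {α κ : Type} [DecidableEq κ] (ks : List κ) (l : List α) (key : α → κ)
    (hnd : ks.Nodup) (hcov : ∀ x ∈ l, key x ∈ ks) :
    (ks.flatMap (fun k => l.filter (fun x => key x == k))).Perm l := by
  induction ks generalizing l with
  | nil =>
    cases l with
    | nil => simp
    | cons a t => exact absurd (hcov a (by simp)) (by simp)
  | cons k ks ih =>
    simp only [List.flatMap_cons]
    have hks : k ∉ ks := (List.nodup_cons.mp hnd).1
    have hrw : ∀ k' ∈ ks, l.filter (fun x => key x == k')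
        = (l.filter (fun x => !(key x == k))).filter (fun x => key x == k') := by
      intro k' hk'
      rw [List.filter_filter]
      apply List.filter_congr
      intro x _
      by_cases hxk' : key x = k'
      · have hkk : ¬ k' = k := fun h => hks (h ▸ hk')
        simp [hxk', hkk]
      · simp [hxk']
    have hfm : ks.flatMap (fun k' => l.filter (fun x => key x == k'))
        = ks.flatMap (fun k' => (l.filter (fun x => !(key x == k))).filter (fun x => key x == k')) := by
      simp only [List.flatMap_def]
      exact congrArg List.flatten (List.map_congr_left hrw)
    rw [hfm]
    have hperm := ih (l.filter (fun x => !(key x == k))) (List.nodup_cons.mp hnd).2 (by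
      intro x hx
      have hxl := List.mem_of_mem_filter hx
      have hne : ¬ key x == k := by
        have := List.of_mem_filter hx; simpa using this
      have := hcov x hxl
      simp at hne
      rcases List.mem_cons.mp this with h | h
      · exact absurd h hne
      · exact h)
    exact ((hperm.append_left (l.filter (fun x => key x == k)))).trans
      (List.filter_append_perm (fun x => key x == k) l)

theorem flatMap_congr_mem {α β : Type} (l : List α) (f g : α → List β)
    (h : ∀ x ∈ l, f x = g x) : l.flatMap f = l.flatMap g := by
  simp only [List.flatMap_def]
  exact congrArg List.flatten (List.map_congr_left h)

theorem ordDict_items (atoms : List (String × Int × Int)) :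
    (atoms.foldl (fun d a => if d.contains a.1 then d else d.insert a.1 (PySem.Dict.size d : Int))
      (PySem.Dict.empty : PySem.Dict String Int)).items
    = (PySem.List.enumerate (PySem.Set.ofList (atoms.map (·.1)))).map (fun q => (q.2, q.1)) := by
  induction atoms using List.reverseRecOn with
  | nil => rfl
  | append_singleton xs a ih =>
    rw [List.foldl_append, List.foldl_cons, List.foldl_nil]
    have hkeys : (xs.foldl (fun d a => if d.contains a.1 then d
          else d.insert a.1 (PySem.Dict.size d : Int)) (PySem.Dict.empty : PySem.Dict String Int)).keys
        = PySem.Set.ofList (xs.map (·.1)) := by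
      show (List.map _ _) = _
      rw [ih, List.map_map]
      exact PySem.List.map_snd_enumerate _ 0
    have hmfst : (xs ++ [a]).map (fun y => y.1) = xs.map (fun y => y.1) ++ [a.1] := by simp
    by_cases hmem : a.1 ∈ PySem.Set.ofList (xs.map (·.1))
    · rw [if_pos (by rw [PySem.Dict.contains_eq_decide_mem_keys, hkeys]; simpa using hmem)]
      rw [ih, hmfst, PySem.Set.ofList_append_singleton, PySem.Set.add_of_mem hmem]
    · rw [if_neg (by rw [PySem.Dict.contains_eq_decide_mem_keys, hkeys]; simpa using hmem)]
      rw [PySem.Dict.items_insert_of_not_contains _ _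
        (by rw [PySem.Dict.contains_eq_decide_mem_keys, hkeys]; simpa using hmem)]
      rw [ih, hmfst, PySem.Set.ofList_append_singleton, PySem.Set.add_of_not_mem hmem]
      rw [PySem.List.enumerate_append]
      have hsize : (PySem.Dict.size (xs.foldl (fun d a => if d.contains a.1 then d
            else d.insert a.1 (PySem.Dict.size d : Int)) (PySem.Dict.empty : PySem.Dict String Int)) : Int)
          = ((PySem.Set.ofList (xs.map (·.1))).length : Int) := by
        show ((List.length _ : Nat) : Int) = _
        rw [show (List.length _ : Nat) = (PySem.Set.ofList (xs.map (·.1))).length from by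
          rw [show (List.length _ : Nat) = ((xs.foldl (fun d a => if d.contains a.1 then d
            else d.insert a.1 (PySem.Dict.size d : Int)) (PySem.Dict.empty : PySem.Dict String Int)).items.length) from rfl,
            ih, List.length_map, PySem.List.length_enumerate]]
      simp [PySem.List.enumerate_cons, PySem.List.enumerate_nil, hsize]

theorem ordDict_keys (atoms : List (String × Int × Int)) :
    (atoms.foldl (fun d a => if d.contains a.1 then d else d.insert a.1 (PySem.Dict.size d : Int))
      (PySem.Dict.empty : PySem.Dict String Int)).keys
    = PySem.Set.ofList (atoms.map (·.1)) := by
  show (List.map _ _) = _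
  rw [ordDict_items, List.map_map]
  exact PySem.List.map_snd_enumerate _ 0

theorem ordDict_getD (atoms : List (String × Int × Int)) (k : Nat)
    (hk : k < (PySem.Set.ofList (atoms.map (·.1))).length) :
    (atoms.foldl (fun d a => if d.contains a.1 then d else d.insert a.1 (PySem.Dict.size d : Int))
      (PySem.Dict.empty : PySem.Dict String Int)).getD
        ((PySem.Set.ofList (atoms.map (·.1)))[k]) 0 = (k : Int) := by
  apply PySem.Dict.getD_of_mem_items
  · rw [ordDict_items]
    refine List.mem_map.mpr ⟨((k : Int), (PySem.Set.ofList (atoms.map (·.1)))[k]), ?_, rfl⟩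
    rw [PySem.List.mem_enumerate_iff]
    exact ⟨k, hk, by simp⟩
  · rw [ordDict_keys]
    exact PySem.Set.nodup_ofList _

def pvOffsList (D : PySem.Dict String (List Int)) :
    List (String × Int × Int) → Int → List Int
  | [], _ => []
  | a :: r, o => o :: pvOffsList D r (o + PySem.List.len (D.getD a.1 []))

def pvOffPairs (D : PySem.Dict String (List Int)) :
    List (String × Int × Int) → Int → List (String × Int)
  | [], _ => []
  | a :: r, o => (a.1, o) :: pvOffPairs D r (o + PySem.List.len (D.getD a.1 []))

theorem offsets_fold (D : PySem.Dict String (List Int)) (atoms : List (String × Int × Int))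
    (xs : List Int) (o : Int) :
    (atoms.foldl (fun (acc : List Int × Int) a =>
      (acc.1 ++ [acc.2], acc.2 + PySem.List.len (D.getD a.1 []))) (xs, o)).1
    = xs ++ pvOffsList D atoms o := by
  induction atoms generalizing xs o with
  | nil => simp [pvOffsList]
  | cons a r ih =>
    rw [List.foldl_cons, ih]
    simp [pvOffsList]

theorem groups_fold (D : PySem.Dict String (List Int)) (atoms : List (String × Int × Int))
    (d : PySem.Dict String (List Int)) (o : Int) :
    (atoms.foldl (fun (st : PySem.Dict String (List Int) × Int) a =>
      (st.1.modify a.1 [] (fun offs => offs ++ [st.2]),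
       st.2 + PySem.List.len (D.getD a.1 []))) (d, o)).1
    = (pvOffPairs D atoms o).foldl (fun d p => d.modify p.1 [] (fun offs => offs ++ [p.2])) d := by
  induction atoms generalizing d o with
  | nil => simp [pvOffPairs]
  | cons a r ih =>
    rw [List.foldl_cons, ih]
    simp [pvOffPairs]

theorem offPairs_map_fst (D : PySem.Dict String (List Int))
    (atoms : List (String × Int × Int)) (o : Int) :
    (pvOffPairs D atoms o).map (·.1) = atoms.map (·.1) := by
  induction atoms generalizing o with
  | nil => rfl
  | cons a r ih => simp [pvOffPairs, ih]

theorem offPairs_eq (D : PySem.Dict String (List Int)) (atoms : List (String × Int × Int))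
    (pre : List Int) (o : Int) :
    (PySem.List.enumerate atoms (pre.length : Int)).map
      (fun p => (p.2.1, PySem.List.pyGetD (pre ++ pvOffsList D atoms o) p.1 0))
    = pvOffPairs D atoms o := by
  induction atoms generalizing pre o with
  | nil => simp [pvOffPairs, PySem.List.enumerate_nil]
  | cons a r ih =>
    rw [PySem.List.enumerate_cons, List.map_cons]
    show (_, PySem.List.pyGetD (pre ++ pvOffsList D (a :: r) o) (pre.length : Int) 0) :: _ = _
    have hhead : PySem.List.pyGetD (pre ++ pvOffsList D (a :: r) o) (pre.length : Int) 0 = o := by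
      rw [PySem.List.pyGetD_natCast, List.getD_eq_getElem?_getD]
      rw [show pvOffsList D (a :: r) o = o :: pvOffsList D r (o + PySem.List.len (D.getD a.1 [])) from rfl]
      simp
    have htail : (PySem.List.enumerate r ((pre.length : Int) + 1)).map
        (fun p => (p.2.1, PySem.List.pyGetD (pre ++ pvOffsList D (a :: r) o) p.1 0))
      = pvOffPairs D r (o + PySem.List.len (D.getD a.1 [])) := by
      have h1 : ((pre.length : Int) + 1) = (((pre ++ [o]).length : Nat) : Int) := by simp
      have h2 : pre ++ pvOffsList D (a :: r) o
          = (pre ++ [o]) ++ pvOffsList D r (o + PySem.List.len (D.getD a.1 [])) := by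
        rw [show pvOffsList D (a :: r) o = o :: pvOffsList D r (o + PySem.List.len (D.getD a.1 [])) from rfl]
        simp
      rw [h1, h2, ih]
    rw [hhead, htail]
    rfl

def pvNormal (atoms : List (String × Int × Int)) (basis : List (String × List (String × List (Int × List Int)))) : List Int :=
  let D := basis.foldl (fun d p => d.insert p.1 (atom_basis_permutation_alt p.2)) PySem.Dict.empty
  (PySem.Set.ofList (atoms.map (·.1))).flatMap (fun t =>
    ((PySem.List.enumerate atoms).filter (fun p => p.2.1 == t)).flatMap (fun p =>
      (PySem.Dict.getD D t []).map (fun j => j + PySem.List.pyGetD (pvOffsList D atoms 0) p.1 0)))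

theorem alt_eq_normal (atoms : List (String × Int × Int)) (basis : List (String × List (String × List (Int × List Int)))) :
    make_basis_permutation_alt atoms basis = pvNormal atoms basis := by
  unfold make_basis_permutation_alt pvNormal
  simp only []
  rw [groups_fold]
  set D := basis.foldl (fun d p => d.insert p.1 (atom_basis_permutation_alt p.2)) PySem.Dict.empty with hD
  set G := (pvOffPairs D atoms 0).foldl (fun d p => d.modify p.1 [] (fun offs => offs ++ [p.2])) PySem.Dict.empty with hG
  have hKeys : G.keys = PySem.Set.ofList (atoms.map (·.1)) := by
    rw [hG, PySem.Dict.keys_foldl_modify_key _ Prod.fst [] (fun _ p => (fun offs => offs ++ [p.2]))]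
    rw [PySem.Dict.keys_empty, PySem.Set.update_nil_left, offPairs_map_fst]
  have hNodup : G.keys.Nodup := by rw [hKeys]; exact PySem.Set.nodup_ofList _
  have hItems : G.items = (PySem.Set.ofList (atoms.map (·.1))).map (fun t =>
      (t, ((pvOffPairs D atoms 0).filter (fun pr => pr.1 == t)).map (·.2))) := by
    rw [PySem.Dict.items_eq_map_keys G hNodup [], hKeys]
    apply List.map_congr_left
    intro t _
    rw [hG, PySem.Dict.getD_foldl_modify_append, PySem.Dict.getD_empty, List.nil_append]
  simp only [PySem.List.foldl_append_singleton_eq_map, PySem.List.foldl_append_eq_flatMap,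
    List.nil_append]
  rw [hItems, List.flatMap_map]
  have hOP : pvOffPairs D atoms 0 = (PySem.List.enumerate atoms).map
      (fun p => (p.2.1, PySem.List.pyGetD (pvOffsList D atoms 0) p.1 0)) := by
    have h := offPairs_eq D atoms [] 0
    simpa using h.symm
  apply flatMap_congr_mem
  intro t _
  rw [hOP, List.flatMap_map, List.filter_map, List.flatMap_map]
  rfl

theorem a_eq_normal (atoms : List (String × Int × Int)) (basis : List (String × List (String × List (Int × List Int)))) :
    make_basis_permutation atoms basis = pvNormal atoms basis := by
  unfold make_basis_permutation pvNormal
  simp only [abp_eq]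
  set D := basis.foldl (fun d p => d.insert p.1 (atom_basis_permutation_alt p.2)) PySem.Dict.empty with hD
  set types := PySem.Set.ofList (atoms.map (·.1)) with htypes
  set E := PySem.List.enumerate atoms with hE
  set ord := atoms.foldl (fun d a => if d.contains a.1 then d
    else d.insert a.1 (PySem.Dict.size d : Int)) PySem.Dict.empty with hord
  rw [offsets_fold D atoms [] 0]
  simp only [List.nil_append]
  have hmemE : ∀ p ∈ E, ∃ (k : Nat) (h : k < atoms.length), p = ((k : Int), atoms[k]) := by
    intro p hp
    rw [hE, PySem.List.mem_enumerate_iff] at hp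
    obtain ⟨k, hk, hpk⟩ := hp
    exact ⟨k, hk, by simpa using hpk⟩
  have hcov : ∀ p ∈ E, p.2.1 ∈ types := by
    intro p hp
    obtain ⟨k, hk, rfl⟩ := hmemE p hp
    rw [htypes]
    refine (PySem.Set.mem_ofList _ _).mpr ?_
    exact List.mem_map.mpr ⟨atoms[k], by simp, rfl⟩
  have hordval : ∀ t ∈ types, ∀ (k : Nat) (hk : k < types.length), t = types[k] →
      ord.getD t 0 = (k : Int) := by
    intro t _ k hk hteq
    subst hteq
    exact ordDict_getD atoms k (by rw [htypes] at hk; exact hk)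
  have hsort : PySem.List.sorted2 (E.map (fun p => (ord.getD p.2.1 0, p.1))) Prod.fst Prod.snd
      = types.flatMap (fun t => (E.filter (fun p => p.2.1 == t)).map (fun p => (ord.getD p.2.1 0, p.1))) := by
    apply sorted2_eq_of_perm_of_pairwise
    · rw [← List.map_flatMap]
      exact (perm_partition types E (fun p => p.2.1)
        (htypes ▸ PySem.Set.nodup_ofList _) hcov).map _
    · rw [List.pairwise_flatMap]
      constructor
      · intro t ht
        rw [List.pairwise_map]
        have hf := (PySem.List.pairwise_lt_enumerate atoms 0).filter (fun p => p.2.1 == t)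
        rw [← hE] at hf
        refine hf.imp_of_mem ?_
        intro a b ha hb hab
        right
        constructor
        · have h1 : a.2.1 = t := by simpa using List.of_mem_filter ha
          have h2 : b.2.1 = t := by simpa using List.of_mem_filter hb
          rw [h1, h2]
        · exact hab
      · have hord_pw : types.Pairwise (fun t1 t2 => ord.getD t1 0 < ord.getD t2 0) := by
          rw [List.pairwise_iff_getElem]
          intro i j hi hj hij
          rw [hordval types[i] (by simp) i hi rfl, hordval types[j] (by simp) j hj rfl]
          exact_mod_cast hij
        refine hord_pw.imp_of_mem ?_
        intro t1 t2 h1 h2 hlt x hx y hy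
        left
        obtain ⟨p, hp, rfl⟩ := List.mem_map.mp hx
        obtain ⟨q, hq, rfl⟩ := List.mem_map.mp hy
        have hp1 : p.2.1 = t1 := by simpa using List.of_mem_filter hp
        have hq1 : q.2.1 = t2 := by simpa using List.of_mem_filter hq
        simpa [hp1, hq1] using hlt
  rw [hsort]
  simp only [PySem.List.foldl_append_singleton_eq_map, PySem.List.foldl_append_eq_flatMap,
    List.nil_append]
  rw [List.map_flatMap, List.flatMap_assoc]
  apply flatMap_congr_mem
  intro t _
  rw [List.map_map, List.flatMap_map]
  apply flatMap_congr_mem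
  intro p hp
  have hpE : p ∈ E := List.mem_of_mem_filter hp
  have hpt : p.2.1 = t := by simpa using List.of_mem_filter hp
  obtain ⟨k, hk, rfl⟩ := hmemE p hpE
  have hata : PySem.List.pyGetD atoms ((k : Int)) ("", 0, 0) = atoms[k] := by
    rw [PySem.List.pyGetD_natCast, List.getD_eq_getElem?_getD]
    simp [hk]
  simp only [Function.comp]
  rw [hata, hpt]

-- ===== VERDICT (by name: the statement is the Claim_ definition above) =====
theorem make_basis_permutation_spec : Claim_equal_make_basis_permutation := by
  intro atoms basis _hdom _hpre
  unfold Spec_make_basis_permutation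
  rw [a_eq_normal, alt_eq_normal]
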